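-- pv_equiv track=rewrite | github.com/Jay-luozhijie/fyp_project | transformer/input_data_extractor.py | convert_words_to_nums
-- ===== SOURCE A (Python) =====
-- def convert_words_to_nums(dic, diff, max_len=512):
--     diff_list = diff.split()
--     diff_num_list = list()
--     for word in diff_list:
--         if(word not in dic):
--             diff_num_list.append(dic["<NULL>"])
--         else:
--             diff_num_list.append(dic[word])
--     diff_num_list = diff_num_list[:max_len]
--     if(len(diff_num_list) < max_len):
--         for i in range(max_len - len(diff_num_list)):
--             diff_num_list.append(dic["<NULL>"])
--     return diff_num_list
-- ===== SOURCE B (Python) =====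
-- def convert_words_to_nums(dic, diff, max_len=512):
--     words = diff.split()
--
--     def at_slot(i):
--         if i < len(words):
--             w = words[i]
--             return dic[w] if w in dic else dic["<NULL>"]
--         return dic["<NULL>"]
--
--     return [at_slot(i) for i in range(max_len)]
-- ===== Notes on version B (the rewrite author's own statement) =====
-- stated objective: alternative
-- what changed: B replaces A's three staged passes (map every word to a number, slice the number list, then pad-loop more numbers onto it) by one positional pass: for each slot i in range(max_len) it emits the id of word i if i is in range, else the '<NULL>' id, never building the oversized intermediate list.
-- intended difference: For negative max_len with more words than |max_len|, A returns the mapped word list with its last |max_len| entries dropped (an artifact of Python's negative slice), while B returns the empty list; the function's purpose is an output of exactly max_len slots, so an empty output is the intended reading of a non-positive length. — e.g. on convert_words_to_nums([("<NULL>", 0), ("a", 1), ("b", 2)], "a b", -1): A returns [1], B returns []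
import Mathlib
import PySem

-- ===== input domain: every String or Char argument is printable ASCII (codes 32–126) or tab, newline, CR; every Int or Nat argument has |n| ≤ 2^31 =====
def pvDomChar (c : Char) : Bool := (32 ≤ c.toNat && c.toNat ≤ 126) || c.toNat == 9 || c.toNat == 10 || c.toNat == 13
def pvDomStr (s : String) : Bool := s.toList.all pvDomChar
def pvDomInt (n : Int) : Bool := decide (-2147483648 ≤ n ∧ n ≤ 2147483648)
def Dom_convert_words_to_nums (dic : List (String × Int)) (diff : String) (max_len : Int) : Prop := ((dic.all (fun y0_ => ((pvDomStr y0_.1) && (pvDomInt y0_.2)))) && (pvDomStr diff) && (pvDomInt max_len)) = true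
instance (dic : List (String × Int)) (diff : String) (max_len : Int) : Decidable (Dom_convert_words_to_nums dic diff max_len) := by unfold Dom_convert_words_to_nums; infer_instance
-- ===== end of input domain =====

-- B fills the max_len output slots in one positional pass over range(max_len) (word id if the
-- slot index is in range, '<NULL>' id otherwise) instead of A's map-all/slice/pad-loop stages
-- (objective: alternative); for negative max_len, B returns [] where A returns a slice artifact (see D_).

-- ===== PORT A =====
def convert_words_to_nums (dic : List (String × Int)) (diff : String) (max_len : Int) : List Int :=
  let diff_list := PySem.Str.split₀ diff
  let diff_num_list := diff_list.foldl (fun acc word =>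
    if (List.lookup word dic).isNone then acc ++ [(List.lookup "<NULL>" dic).getD 0]
    else acc ++ [(List.lookup word dic).getD 0]) []
  let sliced := PySem.List.slice diff_num_list none (some max_len)
  if (sliced.length : Int) < max_len then
    (PySem.List.pyRange 0 (max_len - (sliced.length : Int)) 1).foldl
      (fun acc _ => acc ++ [(List.lookup "<NULL>" dic).getD 0]) sliced
  else sliced

-- ===== PORT B =====
-- Source B's per-slot helper at_slot(i)
def pvAtSlot (dic : List (String × Int)) (words : List String) (i : Int) : Int :=
  if i < (words.length : Int) then
    let w := (PySem.List.pyGet? words i).getD ""   -- i is in range here, so getD never fires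
    if (List.lookup w dic).isSome then (List.lookup w dic).getD 0
    else (List.lookup "<NULL>" dic).getD 0
  else (List.lookup "<NULL>" dic).getD 0

def convert_words_to_nums_alt (dic : List (String × Int)) (diff : String) (max_len : Int) : List Int :=
  let words := PySem.Str.split₀ diff
  (PySem.List.pyRange 0 max_len 1).map (pvAtSlot dic words)

-- ===== PRECONDITION & SPEC =====
-- Pre_ excludes exactly the inputs on which A raises KeyError: "<NULL>" missing from dic while
-- some word of diff is unknown or padding is needed (max_len exceeds the word count).
def Pre_convert_words_to_nums (dic : List (String × Int)) (diff : String) (max_len : Int) : Prop :=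
  (List.lookup "<NULL>" dic).isSome = true ∨
    ((∀ w ∈ PySem.Str.split₀ diff, (List.lookup w dic).isSome = true) ∧
      max_len ≤ ((PySem.Str.split₀ diff).length : Int))
instance (dic : List (String × Int)) (diff : String) (max_len : Int) : Decidable (Pre_convert_words_to_nums dic diff max_len) := by unfold Pre_convert_words_to_nums; infer_instance

def pvWitness_convert_words_to_nums : (List (String × Int)) × String × Int := ([("<NULL>", 0), ("a", 3)], "a b", 4)

-- For negative max_len with more words than |max_len|, A returns the mapped word list with its
-- last |max_len| entries dropped (a Python negative-slice artifact), while B returns the empty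
-- list — the intended output for a non-positive number of slots.
def D_convert_words_to_nums (dic : List (String × Int)) (diff : String) (max_len : Int) : Prop :=
  max_len < 0 ∧ -max_len < ((PySem.Str.split₀ diff).length : Int)
instance (dic : List (String × Int)) (diff : String) (max_len : Int) : Decidable (D_convert_words_to_nums dic diff max_len) := by unfold D_convert_words_to_nums; infer_instance

def Spec_convert_words_to_nums (dic : List (String × Int)) (diff : String) (max_len : Int) (out : List Int) : Prop := ¬ D_convert_words_to_nums dic diff max_len → out = convert_words_to_nums_alt dic diff max_len
instance (dic : List (String × Int)) (diff : String) (max_len : Int) (out : List Int) : Decidable (Spec_convert_words_to_nums dic diff max_len out) := by unfold Spec_convert_words_to_nums; infer_instance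

def pvDiffWitness_convert_words_to_nums : (List (String × Int)) × String × Int := ([("<NULL>", 0), ("a", 1), ("b", 2)], "a b", -1)
def pvDiffWitnessOut_convert_words_to_nums : (List Int) × (List Int) := ([1], [])

-- ===== CLAIM (what is proved, stated in full; the proofs are below) =====
def Claim_unchanged_convert_words_to_nums : Prop := ∀ (dic : List (String × Int)) (diff : String) (max_len : Int), Dom_convert_words_to_nums dic diff max_len → Pre_convert_words_to_nums dic diff max_len → Spec_convert_words_to_nums dic diff max_len (convert_words_to_nums dic diff max_len)
def Claim_changed_convert_words_to_nums : Prop := Dom_convert_words_to_nums (pvDiffWitness_convert_words_to_nums.1) (pvDiffWitness_convert_words_to_nums.2.1) (pvDiffWitness_convert_words_to_nums.2.2) ∧ Pre_convert_words_to_nums (pvDiffWitness_convert_words_to_nums.1) (pvDiffWitness_convert_words_to_nums.2.1) (pvDiffWitness_convert_words_to_nums.2.2) ∧ D_convert_words_to_nums (pvDiffWitness_convert_words_to_nums.1) (pvDiffWitness_convert_words_to_nums.2.1) (pvDiffWitness_convert_words_to_nums.2.2) ∧ convert_words_to_nums (pvDiffWitness_convert_words_to_nums.1) (pvDiffWitness_convert_words_to_nums.2.1)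 (pvDiffWitness_convert_words_to_nums.2.2) = pvDiffWitnessOut_convert_words_to_nums.1 ∧ convert_words_to_nums_alt (pvDiffWitness_convert_words_to_nums.1) (pvDiffWitness_convert_words_to_nums.2.1) (pvDiffWitness_convert_words_to_nums.2.2) = pvDiffWitnessOut_convert_words_to_nums.2 ∧ pvDiffWitnessOut_convert_words_to_nums.1 ≠ pvDiffWitnessOut_convert_words_to_nums.2
def Claim_exact_convert_words_to_nums : Prop := ∀ (dic : List (String × Int)) (diff : String) (max_len : Int), Dom_convert_words_to_nums dic diff max_len → Pre_convert_words_to_nums dic diff max_len → D_convert_words_to_nums dic diff max_len → convert_words_to_nums dic diff max_len ≠ convert_words_to_nums_alt dic diff max_len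

-- ===== LEMMAS AND PROOFS =====

-- A's per-word mapping
def pvMapWord (dic : List (String × Int)) (w : String) : Int :=
  if (List.lookup w dic).isSome then (List.lookup w dic).getD 0
  else (List.lookup "<NULL>" dic).getD 0

theorem pv_fold_map (dic : List (String × Int)) (words : List String) :
    words.foldl (fun acc word =>
        if (List.lookup word dic).isNone then acc ++ [(List.lookup "<NULL>" dic).getD 0]
        else acc ++ [(List.lookup word dic).getD 0]) [] = words.map (pvMapWord dic) := by
  have hfun : (fun (acc : List Int) word =>
      if (List.lookup word dic).isNone then acc ++ [(List.lookup "<NULL>" dic).getD 0]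
      else acc ++ [(List.lookup word dic).getD 0])
      = fun acc word => acc ++ [pvMapWord dic word] := by
    funext acc word
    unfold pvMapWord
    cases List.lookup word dic <;> simp
  rw [hfun, PySem.List.foldl_append_singleton_eq_map]
  simp

-- B's positional pass, written out for nonnegative max_len
theorem pv_B_range (dic : List (String × Int)) (words : List String) (n : Nat) :
    (List.range n).map (fun (k : Nat) => pvAtSlot dic words (0 + (k : Int)))
      = (words.take n).map (pvMapWord dic) ++ List.replicate (n - words.length) ((List.lookup "<NULL>" dic).getD 0) := by
  induction words generalizing n with
  | nil =>
    have hconst : (fun k : Nat => pvAtSlot dic ([] : List String) (0 + (k : Int)))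
        = fun _ => (List.lookup "<NULL>" dic).getD 0 := by
      funext k; unfold pvAtSlot; rw [if_neg (by simp)]
    rw [hconst, List.map_const', List.length_range]
    simp
  | cons w ws ih =>
    cases n with
    | zero => simp [List.range_zero]
    | succ m =>
      rw [List.range_succ_eq_map]
      simp only [List.map_cons, List.map_map]
      have h0 : pvAtSlot dic (w :: ws) (0 + ((0 : Nat) : Int)) = pvMapWord dic w := by
        unfold pvAtSlot pvMapWord
        rw [if_pos (show (0 + ((0 : Nat) : Int)) < (((w :: ws)).length : Int) by simp)]
        have hz : (0 + ((0 : Nat) : Int)) = (0 : Int) := by decide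
        rw [hz, PySem.List.pyGet?_zero_cons w ws]
        simp
      have hshift : ((fun (k : Nat) => pvAtSlot dic (w :: ws) (0 + (k : Int))) ∘ Nat.succ)
          = fun (k : Nat) => pvAtSlot dic ws (0 + (k : Int)) := by
        funext k
        simp only [Function.comp]
        unfold pvAtSlot
        have hk : ((Nat.succ k : Nat) : Int) = (k : Int) + 1 := by push_cast; ring
        have hget : PySem.List.pyGet? (w :: ws) (0 + ((Nat.succ k : Nat) : Int))
            = PySem.List.pyGet? ws (0 + (k : Int)) := by
          rw [hk]
          have : (0 : Int) + ((k : Int) + 1) = ((k : Int)) + 1 := by ring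
          rw [this, PySem.List.pyGet?_cons_succ]
          congr 1
          ring
        have hlt : (0 + ((Nat.succ k : Nat) : Int) < ((w :: ws).length : Int))
            ↔ (0 + (k : Int) < (ws.length : Int)) := by
          simp
        rw [hget]
        by_cases h : 0 + (k : Int) < (ws.length : Int)
        · rw [if_pos (hlt.mpr h), if_pos h]
        · rw [if_neg (fun hc => h (hlt.mp hc)), if_neg h]
      rw [h0, hshift, ih m]
      simp

-- the canonical value both sides take for nonnegative max_len
theorem pv_A_canon (dic : List (String × Int)) (diff : String) (max_len : Int) (h0 : 0 ≤ max_len) :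
    convert_words_to_nums dic diff max_len
      = ((PySem.Str.split₀ diff).take max_len.toNat).map (pvMapWord dic)
        ++ List.replicate (max_len.toNat - (PySem.Str.split₀ diff).length) ((List.lookup "<NULL>" dic).getD 0) := by
  unfold convert_words_to_nums
  simp only [pv_fold_map]
  set words := PySem.Str.split₀ diff with hw
  rw [PySem.List.slice_to _ h0]
  by_cases h : (((words.map (pvMapWord dic)).take max_len.toNat).length : Int) < max_len
  · rw [if_pos h]
    have hlen : words.length < max_len.toNat := by
      simp at h; omega
    rw [PySem.List.foldl_append_singleton_eq_map (fun _ => (List.lookup "<NULL>" dic).getD 0)]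
    rw [List.map_const', PySem.List.length_pyRange_one]
    rw [List.take_of_length_le (by simpa using le_of_lt hlen),
        List.take_of_length_le (le_of_lt hlen)]
    congr 2
    simp
  · rw [if_neg h]
    have hlen : max_len.toNat ≤ words.length := by
      by_contra hc
      push_neg at hc
      apply h
      simp
      omega
    rw [List.map_take]
    have : max_len.toNat - words.length = 0 := by omega
    rw [this, List.replicate_zero, List.append_nil]

theorem pv_B_canon (dic : List (String × Int)) (diff : String) (max_len : Int) (h0 : 0 ≤ max_len) :
    convert_words_to_nums_alt dic diff max_len
      = ((PySem.Str.split₀ diff).take max_len.toNat).map (pvMapWord dic)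
        ++ List.replicate (max_len.toNat - (PySem.Str.split₀ diff).length) ((List.lookup "<NULL>" dic).getD 0) := by
  unfold convert_words_to_nums_alt
  rw [PySem.List.pyRange_one, List.map_map]
  have h1 : (max_len - 0).toNat = max_len.toNat := by omega
  rw [h1]
  exact pv_B_range dic (PySem.Str.split₀ diff) max_len.toNat

-- negative max_len: B is the empty list
theorem pv_B_neg (dic : List (String × Int)) (diff : String) (max_len : Int) (h : max_len < 0) :
    convert_words_to_nums_alt dic diff max_len = [] := by
  unfold convert_words_to_nums_alt
  rw [PySem.List.pyRange_one_eq_nil (by omega)]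
  rfl

-- negative max_len: A is the mapped word list minus its last |max_len| entries
theorem pv_A_neg (dic : List (String × Int)) (diff : String) (max_len : Int) (h : max_len < 0) :
    convert_words_to_nums dic diff max_len
      = ((PySem.Str.split₀ diff).map (pvMapWord dic)).take
          ((PySem.Str.split₀ diff).length - (-max_len).toNat) := by
  unfold convert_words_to_nums
  simp only [pv_fold_map]
  set words := PySem.Str.split₀ diff with hw
  have hk : max_len = -(((-max_len).toNat : Nat) : Int) := by omega
  have hkpos : 0 < (-max_len).toNat := by omega
  rw [hk, PySem.List.slice_to_neg_natCast _ _ hkpos]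
  rw [if_neg (by
    have : (0:Int) ≤ (((words.map (pvMapWord dic)).take ((words.map (pvMapWord dic)).length - (-max_len).toNat)).length : Int) := by positivity
    omega)]
  simp
  omega

-- ===== VERDICT (by name: the statement is the Claim_ definition above) =====
theorem convert_words_to_nums_spec : Claim_unchanged_convert_words_to_nums := by
  intro dic diff max_len _hDom _hPre hD
  by_cases h0 : 0 ≤ max_len
  · rw [pv_A_canon dic diff max_len h0, pv_B_canon dic diff max_len h0]
  · push_neg at h0
    unfold D_convert_words_to_nums at hD
    push_neg at hD
    have hle : ((PySem.Str.split₀ diff).length : Int) ≤ -max_len := hD h0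
    rw [pv_B_neg dic diff max_len h0, pv_A_neg dic diff max_len h0]
    have : (PySem.Str.split₀ diff).length - (-max_len).toNat = 0 := by omega
    rw [this, List.take_zero]

theorem convert_words_to_nums_changed : Claim_changed_convert_words_to_nums := by
  unfold Claim_changed_convert_words_to_nums; decide

theorem convert_words_to_nums_tight : Claim_exact_convert_words_to_nums := by
  intro dic diff max_len _hDom _hPre hD
  obtain ⟨hneg, hlen⟩ := hD
  rw [pv_A_neg dic diff max_len hneg, pv_B_neg dic diff max_len hneg]
  intro hEq
  have := congrArg List.length hEq
  simp at this
  omega
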